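-- pv_equiv track=rewrite | github.com/lucascppessoa/FloridaAed202502 | helpers.py | aligned_week_windows
-- ===== SOURCE A (Python) =====
-- from typing import Dict, List, Tuple
--
-- def aligned_week_windows(shifts: int) -> List[Tuple[int, int]]:
--     """Aligned weekly windows (21 shifts), last one may be partial.
--     Alignment: week boundary at shift index multiples of 21 starting at 0.
--     Returns list of (start, end) indices, end exclusive."""
--     windows = []
--     start = 0
--     while start < shifts:
--         end = min(shifts, start + 21)
--         windows.append((start, end))
--         start += 21
--     return windows
-- ===== SOURCE B (Python) =====
-- from typing import Dict, List, Tuple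
--
-- def aligned_week_windows(shifts: int) -> List[Tuple[int, int]]:
--     """Aligned weekly windows (21 shifts), last one may be partial.
--     Built back-to-front: emit the final window of the current prefix,
--     recede to the aligned boundary below it, then reverse."""
--     windows = []
--     end = shifts
--     while end > 0:
--         start = ((end - 1) // 21) * 21
--         windows.append((start, end))
--         end = start
--     return windows[::-1]
-- ===== Notes on version B (the rewrite author's own statement) =====
-- stated objective: alternative
-- what changed: B builds the window list back-to-front: starting from the total count it repeatedly emits the final window down to the nearest preceding week boundary, recedes to that boundary, and reverses at the end, instead of A's forward stepping accumulator with min().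
import Mathlib
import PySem

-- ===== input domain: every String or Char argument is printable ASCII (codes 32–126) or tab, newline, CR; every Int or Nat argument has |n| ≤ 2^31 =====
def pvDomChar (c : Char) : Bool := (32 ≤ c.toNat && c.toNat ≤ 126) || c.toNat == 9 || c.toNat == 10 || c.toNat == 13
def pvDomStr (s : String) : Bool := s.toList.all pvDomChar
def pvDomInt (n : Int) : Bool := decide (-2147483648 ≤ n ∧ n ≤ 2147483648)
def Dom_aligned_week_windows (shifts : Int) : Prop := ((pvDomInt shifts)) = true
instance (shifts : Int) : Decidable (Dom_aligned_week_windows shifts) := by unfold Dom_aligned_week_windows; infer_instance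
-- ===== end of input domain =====

-- B builds the windows back-to-front from end=shifts, receding to aligned boundaries, then reverses; objective: alternative decomposition, same cost.


-- ===== PORT A =====
-- while start < shifts: append (start, min(shifts, start+21)); start += 21
def awwLoop (shifts start : Int) (windows : List (Int × Int)) : List (Int × Int) :=
  if start < shifts then
    awwLoop shifts (start + 21) (windows ++ [(start, min shifts (start + 21))])
  else windows
termination_by (shifts - start).toNat
decreasing_by omega

def aligned_week_windows (shifts : Int) : List (Int × Int) :=
  awwLoop shifts 0 []

-- ===== PORT B =====
-- while end > 0: start = ((end-1)//21)*21; append (start, end); end = start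
def awwBackLoop (e : Int) (windows : List (Int × Int)) : List (Int × Int) :=
  if 0 < e then
    awwBackLoop ((PySem.Int.floordiv (e - 1) 21) * 21)
      (windows ++ [((PySem.Int.floordiv (e - 1) 21) * 21, e)])
  else windows
termination_by e.toNat
decreasing_by
  simp only [PySem.Int.floordiv_eq_ediv_of_pos (by norm_num : (0:Int) < 21)]
  omega

-- windows[::-1] ported via PySem.List.slice?_none_none_neg_one: it is List.reverse
def aligned_week_windows_alt (shifts : Int) : List (Int × Int) :=
  (awwBackLoop shifts []).reverse

-- ===== PRECONDITION & SPEC =====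
def Spec_aligned_week_windows (shifts : Int) (out : List (Int × Int)) : Prop := out = aligned_week_windows_alt shifts
instance (shifts : Int) (out : List (Int × Int)) : Decidable (Spec_aligned_week_windows shifts out) := by unfold Spec_aligned_week_windows; infer_instance

-- ===== CLAIM (what is proved, stated in full; the proofs are below) =====
def Claim_equal_aligned_week_windows : Prop := ∀ (shifts : Int), Dom_aligned_week_windows shifts → Spec_aligned_week_windows shifts (aligned_week_windows shifts)

-- ===== LEMMAS AND PROOFS =====

theorem awwLoop_append (shifts : Int) : ∀ (n : Nat) (s : Int) (acc : List (Int × Int)),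
    (shifts - s).toNat ≤ n → awwLoop shifts s acc = acc ++ awwLoop shifts s [] := by
  intro n
  induction n with
  | zero =>
    intro s acc h
    conv_lhs => rw [awwLoop]
    conv_rhs => rw [awwLoop]
    have hns : ¬ s < shifts := by omega
    simp [hns]
  | succ n ih =>
    intro s acc h
    conv_lhs => rw [awwLoop]
    conv_rhs => rw [awwLoop]
    by_cases hs : s < shifts
    · simp only [hs, if_pos, List.nil_append]
      rw [ih (s + 21) (acc ++ [(s, min shifts (s + 21))]) (by omega),
          ih (s + 21) [(s, min shifts (s + 21))] (by omega)]
      simp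
    · simp [hs]

theorem awwLoop_unfold (shifts s : Int) :
    awwLoop shifts s [] =
      if s < shifts then (s, min shifts (s + 21)) :: awwLoop shifts (s + 21) [] else [] := by
  conv_lhs => rw [awwLoop]
  by_cases hs : s < shifts
  · simp only [hs, if_pos, List.nil_append]
    rw [awwLoop_append shifts (shifts - (s + 21)).toNat (s + 21) _ (by omega)]
    simp
  · simp [hs]

-- closed form of A's loop from an aligned start 21*j
theorem awwLoop_closed (shifts : Int) : ∀ (n : Nat) (j : Int), 0 ≤ j → (shifts - 21 * j).toNat ≤ n →
    awwLoop shifts (21 * j) [] =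
      (PySem.List.pyRange j ((max shifts 0) / 21) 1).map (fun i => (i * 21, i * 21 + 21)) ++
        (if (max shifts 0) % 21 ≠ 0 ∧ j ≤ (max shifts 0) / 21
          then [(((max shifts 0) / 21) * 21, shifts)] else []) := by
  intro n
  induction n with
  | zero =>
    intro j hj h
    have hstop : ¬ 21 * j < shifts := by omega
    rw [awwLoop_unfold]
    simp only [hstop]
    rw [PySem.List.pyRange_one_eq_nil (by omega)]
    have hc : ¬ ((max shifts 0) % 21 ≠ 0 ∧ j ≤ (max shifts 0) / 21) := by omega
    rw [if_neg hc]
    simp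
  | succ n ih =>
    intro j hj h
    by_cases hs : 21 * j < shifts
    · rw [awwLoop_unfold]
      simp only [hs, if_pos]
      rw [show 21 * j + 21 = 21 * (j + 1) by ring, ih (j + 1) (by omega) (by omega)]
      by_cases hlt : j < (max shifts 0) / 21
      · rw [PySem.List.pyRange_one_cons hlt]
        have hcond : ((max shifts 0) % 21 ≠ 0 ∧ j ≤ (max shifts 0) / 21) =
            ((max shifts 0) % 21 ≠ 0 ∧ j + 1 ≤ (max shifts 0) / 21) := by
          apply propext; constructor <;> rintro ⟨h1, h2⟩ <;> exact ⟨h1, by omega⟩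
        simp only [hcond, List.map_cons, List.cons_append]
        congr 1
        simp only [Prod.mk.injEq]
        omega
      · have hnext : ¬ ((max shifts 0) % 21 ≠ 0 ∧ j + 1 ≤ (max shifts 0) / 21) := by omega
        rw [PySem.List.pyRange_one_eq_nil (by omega : (max shifts 0) / 21 ≤ j + 1)]
        rw [PySem.List.pyRange_one_eq_nil (by omega : (max shifts 0) / 21 ≤ j)]
        have hcur : ((max shifts 0) % 21 ≠ 0 ∧ j ≤ (max shifts 0) / 21) := by omega
        have hjq : j = (max shifts 0) / 21 := by omega
        have hmin : min shifts (21 * (j + 1)) = shifts := by omega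
        simp only [hnext, List.map_nil, List.nil_append, hcur, hmin]
        rw [hjq]
        simp [hcur.1, Int.mul_comm]
    · rw [awwLoop_unfold]
      simp only [hs]
      rw [PySem.List.pyRange_one_eq_nil (by omega)]
      have hc : ¬ ((max shifts 0) % 21 ≠ 0 ∧ j ≤ (max shifts 0) / 21) := by omega
      rw [if_neg hc]
      simp

-- A's loop splits as: windows for the aligned prefix, then the final window
theorem awwLoop_split (e : Int) (he : 0 < e) :
    awwLoop e 0 [] = awwLoop (((e - 1) / 21) * 21) 0 [] ++ [(((e - 1) / 21) * 21, e)] := by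
  have hq : 0 ≤ (e - 1) / 21 := by omega
  have hA := awwLoop_closed e ((e - 21 * 0).toNat) 0 (le_refl 0) (le_refl _)
  have hB := awwLoop_closed (21 * ((e - 1) / 21)) ((21 * ((e - 1) / 21) - 21 * 0).toNat) 0
    (le_refl 0) (le_refl _)
  rw [show (21:Int) * 0 = 0 by norm_num] at hA hB
  have hmaxB : max (21 * ((e - 1) / 21)) 0 = 21 * ((e - 1) / 21) := by omega
  rw [hmaxB] at hB
  have hmodB : (21 * ((e - 1) / 21)) % 21 = 0 := by omega
  have hdivB : (21 * ((e - 1) / 21)) / 21 = (e - 1) / 21 := by omega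
  rw [hmodB, hdivB] at hB
  simp only [ne_eq, not_true_eq_false, false_and, if_false, List.append_nil] at hB
  have hmaxA : max e 0 = e := by omega
  rw [hmaxA] at hA
  rw [hA, show ((e - 1) / 21) * 21 = 21 * ((e - 1) / 21) by ring, hB]
  by_cases hr : e % 21 = 0
  · -- e is a positive multiple of 21: last window is a full one
    have hq1 : e / 21 = (e - 1) / 21 + 1 := by omega
    rw [if_neg (by omega), hq1,
        PySem.List.pyRange_one_succ_right (by omega : (0:Int) ≤ (e - 1) / 21)]
    simp only [List.map_append, List.map_cons, List.map_nil, List.append_nil,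
      List.append_cancel_left_eq, List.cons.injEq, Prod.mk.injEq, and_true]
    omega
  · -- partial last window
    have hq1 : e / 21 = (e - 1) / 21 := by omega
    rw [if_pos ⟨hr, by omega⟩, hq1]
    simp [Int.mul_comm]

theorem awwBackLoop_append : ∀ (n : Nat) (e : Int) (acc : List (Int × Int)),
    e.toNat ≤ n → awwBackLoop e acc = acc ++ awwBackLoop e [] := by
  intro n
  induction n with
  | zero =>
    intro e acc h
    conv_lhs => rw [awwBackLoop]
    conv_rhs => rw [awwBackLoop]
    have hne : ¬ 0 < e := by omega
    simp [hne]
  | succ n ih =>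
    intro e acc h
    conv_lhs => rw [awwBackLoop]
    conv_rhs => rw [awwBackLoop]
    by_cases he : 0 < e
    · simp only [he, if_pos, List.nil_append]
      have hfd : PySem.Int.floordiv (e - 1) 21 = (e - 1) / 21 :=
        PySem.Int.floordiv_eq_ediv_of_pos (by norm_num)
      rw [hfd]
      rw [ih (((e - 1) / 21) * 21) (acc ++ [(((e - 1) / 21) * 21, e)]) (by omega),
          ih (((e - 1) / 21) * 21) [(((e - 1) / 21) * 21, e)] (by omega)]
      simp
    · simp [he]

-- B's backwards loop produces exactly the reverse of A's loop output
theorem awwBackLoop_eq_reverse : ∀ (n : Nat) (e : Int), e.toNat ≤ n →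
    awwBackLoop e [] = (awwLoop e 0 []).reverse := by
  intro n
  induction n with
  | zero =>
    intro e h
    rw [awwBackLoop, awwLoop_unfold]
    have hne : ¬ 0 < e := by omega
    simp [hne]
  | succ n ih =>
    intro e h
    by_cases he : 0 < e
    · conv_lhs => rw [awwBackLoop]
      simp only [he, if_pos, List.nil_append]
      have hfd : PySem.Int.floordiv (e - 1) 21 = (e - 1) / 21 :=
        PySem.Int.floordiv_eq_ediv_of_pos (by norm_num)
      rw [hfd]
      rw [awwBackLoop_append (((e - 1) / 21) * 21).toNat (((e - 1) / 21) * 21) _ (le_refl _)]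
      rw [ih (((e - 1) / 21) * 21) (by omega)]
      rw [awwLoop_split e he]
      simp
    · rw [awwBackLoop, awwLoop_unfold]
      simp [he]

-- ===== VERDICT (by name: the statement is the Claim_ definition above) =====
theorem aligned_week_windows_spec : Claim_equal_aligned_week_windows := by
  intro shifts _
  unfold Spec_aligned_week_windows aligned_week_windows aligned_week_windows_alt
  rw [awwBackLoop_eq_reverse shifts.toNat shifts (le_refl _)]
  simp
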